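-- pv_equiv track=rewrite | github.com/access2justice/law-bot | data/archive/scripts_extraction/retrieve_law_data.py | extract_article_metadata
-- ===== SOURCE A (Python) =====
-- def extract_article_metadata(previous_el, main_article_num, metadata):
--     """
--     Extract article metadata
--     """
--     metadata_elements = previous_el.split('/') # previous element was metadata, split it in pieces
--     current_metadata_el_list = metadata_elements[0]
--     el_metadata = [main_article_num, metadata[current_metadata_el_list]] # store main article number
--     for m_el in metadata_elements[1:]: # get every single piece on the way to the article
--         current_metadata_el_list += f"/{m_el}"
--         el_metadata.append(metadata[current_metadata_el_list])
--     return el_metadata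
-- ===== SOURCE B (Python) =====
-- def extract_article_metadata(previous_el, main_article_num, metadata):
--     """
--     Extract article metadata
--     """
--     segments = previous_el.split('/')
--     return [main_article_num] + [metadata['/'.join(segments[:i])]
--                                  for i in range(1, len(segments) + 1)]
-- ===== Notes on version B (the rewrite author's own statement) =====
-- stated objective: alternative
-- what changed: A threads a running prefix string and a growing accumulator through an explicit loop; B rebuilds each '/'-prefix independently by slicing the segment list and joining it, emitting the result directly as a comprehension with no running state.
import Mathlib
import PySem

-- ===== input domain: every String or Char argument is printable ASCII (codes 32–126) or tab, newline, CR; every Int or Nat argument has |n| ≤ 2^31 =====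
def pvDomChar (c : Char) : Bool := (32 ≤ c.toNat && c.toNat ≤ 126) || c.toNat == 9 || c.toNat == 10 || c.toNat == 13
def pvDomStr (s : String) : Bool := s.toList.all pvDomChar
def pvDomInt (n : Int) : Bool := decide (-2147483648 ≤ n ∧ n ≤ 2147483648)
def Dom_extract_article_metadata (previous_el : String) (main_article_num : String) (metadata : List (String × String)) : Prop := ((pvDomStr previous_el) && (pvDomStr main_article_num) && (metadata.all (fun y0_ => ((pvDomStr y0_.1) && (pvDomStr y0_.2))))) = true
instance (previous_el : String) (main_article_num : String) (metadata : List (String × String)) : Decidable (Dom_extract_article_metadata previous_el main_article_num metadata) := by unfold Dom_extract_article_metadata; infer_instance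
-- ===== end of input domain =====

-- B replaces A's running-prefix accumulator loop by a direct comprehension that rebuilds each
-- '/'-prefix with a slice + join; same output, same KeyError behaviour (objective: alternative).

-- ===== PORT A =====
-- A's dict lookup metadata[k]; Pre_ guarantees the key is present, the "" default is never read.
def pvLookup (metadata : List (String × String)) (k : String) : String :=
  ((PySem.Dict.mk metadata).get? k).getD ""

def extract_article_metadata (previous_el : String) (main_article_num : String) (metadata : List (String × String)) : List String :=
  -- split with a nonempty separator never raises; split? is always `some` here
  let metadata_elements := (PySem.Str.split? previous_el "/").getD []
  let current_metadata_el_list := (PySem.List.pyGet? metadata_elements 0).getD ""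
  let el_metadata := [main_article_num, pvLookup metadata current_metadata_el_list]
  ((PySem.List.slice metadata_elements (some 1) none).foldl
      (fun (st : String × List String) m_el =>
        (st.1 ++ "/" ++ m_el, st.2 ++ [pvLookup metadata (st.1 ++ "/" ++ m_el)]))
      (current_metadata_el_list, el_metadata)).2

-- ===== PORT B =====
def extract_article_metadata_alt (previous_el : String) (main_article_num : String) (metadata : List (String × String)) : List String :=
  let segments := (PySem.Str.split? previous_el "/").getD []
  main_article_num ::
    (PySem.List.pyRange 1 ((segments.length : Int) + 1) 1).map
      (fun i => pvLookup metadata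
        (PySem.Str.join "/" (PySem.List.slice segments none (some i))))

-- ===== PRECONDITION & SPEC =====
-- Pre_ excludes exactly the inputs where Python A raises KeyError: every cumulative
-- '/'-prefix of previous_el must be a key of metadata.
def Pre_extract_article_metadata (previous_el : String) (_main_article_num : String) (metadata : List (String × String)) : Prop :=
  ∀ i < ((PySem.Str.split? previous_el "/").getD []).length,
    (PySem.Dict.mk metadata).contains
      (PySem.Str.join "/" (((PySem.Str.split? previous_el "/").getD []).take (i+1))) = true
instance (previous_el : String) (main_article_num : String) (metadata : List (String × String)) : Decidable (Pre_extract_article_metadata previous_el main_article_num metadata) := by unfold Pre_extract_article_metadata; infer_instance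

def pvWitness_extract_article_metadata : String × String × (List (String × String)) :=
  ("a/b", "7", [("a", "x"), ("a/b", "y")])

def Spec_extract_article_metadata (previous_el : String) (main_article_num : String) (metadata : List (String × String)) (out : List String) : Prop := out = extract_article_metadata_alt previous_el main_article_num metadata
instance (previous_el : String) (main_article_num : String) (metadata : List (String × String)) (out : List String) : Decidable (Spec_extract_article_metadata previous_el main_article_num metadata out) := by unfold Spec_extract_article_metadata; infer_instance

-- ===== CLAIM (what is proved, stated in full; the proofs are below) =====
def Claim_equal_extract_article_metadata : Prop := ∀ (previous_el : String) (main_article_num : String) (metadata : List (String × String)), Dom_extract_article_metadata previous_el main_article_num metadata → Pre_extract_article_metadata previous_el main_article_num metadata → Spec_extract_article_metadata previous_el main_article_num metadata (extract_article_metadata previous_el main_article_num metadata)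

-- ===== LEMMAS AND PROOFS =====

-- splitOn.go leaves its accumulator strictly shorter than its result
lemma splitOn_go_length (sep : List Char) :
    ∀ (fuel : Nat) (l cur : List Char) (acc : List (List Char)),
      acc.length < (PySem.Chars.splitOn.go sep fuel l cur acc).length := by
  intro fuel
  induction fuel with
  | zero => intro l cur acc; simp [PySem.Chars.splitOn.go]
  | succ fuel ih =>
    intro l cur acc
    cases l with
    | nil => simp [PySem.Chars.splitOn.go]
    | cons c rest =>
      rw [PySem.Chars.splitOn.go]
      split
      · exact Nat.lt_of_succ_lt (by simpa using ih _ _ (cur.reverse :: acc))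
      · exact ih _ _ _

lemma split?_getD_ne_nil (s : String) :
    (PySem.Str.split? s "/").getD [] ≠ [] := by
  have h := splitOn_go_length ("/".toList) (s.toList.length + 1) s.toList [] []
  simp only [PySem.Str.split?, PySem.Chars.split?, PySem.Chars.splitOn] at *
  intro hc
  simp only [List.isEmpty_iff, if_neg (by decide : ¬ ("/".toList = [])), Option.map_some,
    Option.getD_some] at hc
  rw [List.map_eq_nil_iff] at hc
  rw [hc] at h
  simp at h

-- gluing the first two pieces into the separator-joined head
lemma chars_join_glue (sep x y : List Char) (l : List (List Char)) :
    PySem.Chars.join sep ((x ++ sep ++ y) :: l) = x ++ sep ++ PySem.Chars.join sep (y :: l) := by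
  cases l with
  | nil => simp [PySem.Chars.join_singleton]
  | cons z l => simp [PySem.Chars.join_cons_cons]

lemma str_join_glue (a b : String) (l : List String) :
    PySem.Str.join "/" (a :: b :: l) = PySem.Str.join "/" ((a ++ "/" ++ b) :: l) := by
  simp only [PySem.Str.join, List.map_cons, PySem.Chars.join_cons_cons, String.toList_append]
  rw [chars_join_glue]

lemma str_join_singleton (a : String) : PySem.Str.join "/" [a] = a := by
  simp [PySem.Str.join, PySem.Chars.join_singleton, String.ofList_toList]

-- A's accumulator loop, characterised: every step appends the lookup of the next joined prefix
lemma foldA (f : String → String) :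
    ∀ (rest : List String) (p : String) (acc : List String),
      (rest.foldl (fun (st : String × List String) m =>
          (st.1 ++ "/" ++ m, st.2 ++ [f (st.1 ++ "/" ++ m)])) (p, acc)).2
      = acc ++ (List.range rest.length).map
          (fun k => f (PySem.Str.join "/" (p :: rest.take (k+1)))) := by
  intro rest
  induction rest with
  | nil => intro p acc; simp
  | cons m rest ih =>
    intro p acc
    simp only [List.foldl_cons, ih, List.length_cons, List.range_succ_eq_map, List.map_cons,
      List.map_map, List.take_succ_cons, List.take_zero, List.append_assoc,
      List.singleton_append]
    congr 1
    congr 1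
    · rw [str_join_glue, str_join_singleton]
    · refine List.map_congr_left (fun k _ => ?_)
      simp only [Function.comp_apply]
      rw [str_join_glue]

-- ===== VERDICT (by name: the statement is the Claim_ definition above) =====
theorem extract_article_metadata_spec : Claim_equal_extract_article_metadata := by
  intro previous_el main_article_num metadata _ _
  unfold Spec_extract_article_metadata extract_article_metadata extract_article_metadata_alt
  cases hmes : (PySem.Str.split? previous_el "/").getD [] with
  | nil => exact absurd hmes (split?_getD_ne_nil previous_el)
  | cons first rest =>
    simp only [PySem.List.slice_from_one, List.tail_cons, PySem.List.pyGet?_zero,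
      List.getElem?_cons_zero, Option.getD_some]
    rw [foldA]
    rw [PySem.List.pyRange_one]
    simp only [List.length_cons]
    have hn : (((rest.length + 1 : Nat) : Int) + 1 - 1) = ((rest.length + 1 : Nat) : Int) := by
      ring
    rw [hn, Int.toNat_natCast]
    simp only [List.map_map, List.range_succ_eq_map, List.map_cons, List.map_map,
      List.cons_append, List.nil_append]
    congr 1
    congr 1
    · -- head of B's comprehension: i = 1, segments[:1] = [first]
      simp only [Nat.cast_zero, add_zero]
      rw [PySem.List.slice_to _ (by norm_num : (0:Int) ≤ 1)]
      norm_num [str_join_singleton]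
    · refine List.map_congr_left (fun k _ => ?_)
      simp only [Function.comp_apply]
      have h1 : ((1 : Int) + ((k + 1 : Nat) : Int)) = ((k + 2 : Nat) : Int) := by push_cast; ring
      rw [h1, PySem.List.slice_to_natCast]
      simp [List.take_succ_cons]
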